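-- pv_equiv track=rewrite | github.com/Al355ndr0/Markov_Chain_bioinformatics_code | markov chain.py | count_dinucleotides
-- ===== SOURCE A (Python) =====
-- NUCLEOTIDES = ['A', 'C', 'G', 'T']
--
-- def init_matrix():
--     matrix = {}
--     for x in NUCLEOTIDES:
--         matrix[x] = {}
--         for y in NUCLEOTIDES:
--             matrix[x][y] = 0
--     return matrix
--
-- def count_dinucleotides(sequences):
--     matrix = init_matrix()
--     for seq in sequences:
--         for i in range(len(seq) - 1):
--             x, y = seq[i], seq[i + 1]
--             if x in NUCLEOTIDES and y in NUCLEOTIDES: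
--                 matrix[x][y] += 1
--     return matrix
-- ===== SOURCE B (Python) =====
-- NUCLEOTIDES = ['A', 'C', 'G', 'T']
--
-- def count_dinucleotides(sequences):
--     # per-cell: for each of the 16 matrix cells, independently count its pair
--     # across all sequences; no mutable accumulator, no validity guard.
--     return {x: {y: sum(a == x and b == y
--                        for seq in sequences
--                        for a, b in zip(seq, seq[1:]))
--                 for y in NUCLEOTIDES}
--             for x in NUCLEOTIDES}
-- ===== Notes on version B (the rewrite author's own statement) =====
-- stated objective: alternative
-- what changed: A makes one pass over the data, mutating a pre-initialised nested dict behind a validity guard; B inverts the traversal: it builds the result matrix directly, computing each of the 16 cells by an independent scan that counts exactly that cell's pair, so the accumulator dict and the guard branch disappear.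
import Mathlib
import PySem

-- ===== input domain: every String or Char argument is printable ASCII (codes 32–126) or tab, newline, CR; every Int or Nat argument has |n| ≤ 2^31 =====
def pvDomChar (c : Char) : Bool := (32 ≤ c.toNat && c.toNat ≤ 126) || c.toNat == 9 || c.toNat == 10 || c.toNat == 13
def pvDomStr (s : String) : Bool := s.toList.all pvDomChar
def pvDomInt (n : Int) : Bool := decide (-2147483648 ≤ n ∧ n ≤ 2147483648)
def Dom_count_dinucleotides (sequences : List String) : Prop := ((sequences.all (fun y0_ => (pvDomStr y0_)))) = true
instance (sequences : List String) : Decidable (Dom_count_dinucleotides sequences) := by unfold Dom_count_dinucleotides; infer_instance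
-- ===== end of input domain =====

-- B inverts the traversal: each of the 16 matrix cells is computed by its own independent scan
-- (no accumulator dict, no validity guard); alternative decomposition, same return value.


-- ===== PORT A =====
def NUCLEOTIDES : List String := ["A", "C", "G", "T"]

-- matrix[x] = {} ; matrix[x][y] = 0  (nested insert loops, as in A)
def init_matrix : PySem.Dict String (PySem.Dict String Int) :=
  NUCLEOTIDES.foldl (fun matrix x =>
    let matrix := matrix.insert x PySem.Dict.empty
    NUCLEOTIDES.foldl (fun matrix y =>
      matrix.modify x PySem.Dict.empty (fun row => row.insert y 0)) matrix)
    PySem.Dict.empty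

-- seq[i] is always in range for i in range(len(seq)-1), so pyGetD's default is never read
def count_dinucleotides (sequences : List String) : List (String × List (String × Int)) :=
  let matrix := sequences.foldl (fun matrix seq =>
    let chars := seq.toList
    (PySem.List.pyRange 0 (PySem.Str.len seq - 1) 1).foldl (fun matrix i =>
      let x := String.singleton (PySem.List.pyGetD chars i ' ')
      let y := String.singleton (PySem.List.pyGetD chars (i + 1) ' ')
      if x ∈ NUCLEOTIDES ∧ y ∈ NUCLEOTIDES then
        matrix.modify x PySem.Dict.empty (fun row => row.modify y 0 (· + 1))
      else matrix) matrix) init_matrix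
  matrix.items.map (fun p => (p.1, p.2.items))

-- ===== PORT B =====
-- {x: {y: sum(a == x and b == y for seq in sequences for a, b in zip(seq, seq[1:])) …}}
-- the nested generator is ported as a fold over the concatenation of the per-sequence zips
def count_dinucleotides_alt (sequences : List String) : List (String × List (String × Int)) :=
  NUCLEOTIDES.map (fun x => (x,
    NUCLEOTIDES.map (fun y => (y,
      (sequences.flatMap (fun seq =>
          seq.toList.zip (PySem.List.slice seq.toList (some 1) none))).foldl
        (fun acc cc =>
          acc + (if String.singleton cc.1 = x ∧ String.singleton cc.2 = y then 1 else 0))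
        (0 : Int)))))

-- ===== PRECONDITION & SPEC =====
def Spec_count_dinucleotides (sequences : List String) (out : List (String × List (String × Int))) : Prop := out = count_dinucleotides_alt sequences
instance (sequences : List String) (out : List (String × List (String × Int))) : Decidable (Spec_count_dinucleotides sequences out) := by unfold Spec_count_dinucleotides; infer_instance

-- ===== CLAIM (what is proved, stated in full; the proofs are below) =====
def Claim_equal_count_dinucleotides : Prop := ∀ (sequences : List String), Dom_count_dinucleotides sequences → Spec_count_dinucleotides sequences (count_dinucleotides sequences)

-- ===== LEMMAS AND PROOFS =====

-- canonical shape of A's matrix: the 4×4 dict with values given by f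
def pvMk (f : String × String → Int) : PySem.Dict String (PySem.Dict String Int) :=
  PySem.Dict.mk (NUCLEOTIDES.map (fun x =>
    (x, PySem.Dict.mk (NUCLEOTIDES.map (fun y => (y, f (x, y)))))))

def pvBump (f : String × String → Int) (p : String × String) : String × String → Int :=
  fun q => if q = p then f q + 1 else f q

-- all adjacent pairs of one sequence, as one-char strings
def pvPairs (seq : String) : List (String × String) :=
  (seq.toList.zip (seq.toList.drop 1)).map (fun cc =>
    (String.singleton cc.1, String.singleton cc.2))

def pvValid (p : String × String) : Bool := decide (p.1 ∈ NUCLEOTIDES ∧ p.2 ∈ NUCLEOTIDES)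

lemma pvMk_init : init_matrix = pvMk (fun _ => 0) := by decide

lemma pvMk_congr (f g : String × String → Int)
    (h : ∀ p, f p = g p) : pvMk f = pvMk g := by
  have : f = g := funext h
  rw [this]

lemma pvMk_step (f : String × String → Int) (x y : String)
    (hx : x ∈ NUCLEOTIDES) (hy : y ∈ NUCLEOTIDES) :
    (pvMk f).modify x PySem.Dict.empty (fun row => row.modify y 0 (· + 1))
      = pvMk (pvBump f (x, y)) := by
  fin_cases hx <;> fin_cases hy <;> rfl

-- one pairs-list processed by A's guarded update, from a canonical state
lemma pvFoldA (ps : List (String × String)) (f : String × String → Int) :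
    ps.foldl (fun m p =>
        if p.1 ∈ NUCLEOTIDES ∧ p.2 ∈ NUCLEOTIDES then
          m.modify p.1 PySem.Dict.empty (fun row => row.modify p.2 0 (· + 1))
        else m) (pvMk f)
      = pvMk (fun q => f q + ((ps.filter pvValid).count q : Int)) := by
  induction ps generalizing f with
  | nil => simp
  | cons p ps ih =>
    by_cases h : p.1 ∈ NUCLEOTIDES ∧ p.2 ∈ NUCLEOTIDES
    · simp only [List.foldl_cons, if_pos h, pvMk_step f p.1 p.2 h.1 h.2, ih]
      apply pvMk_congr
      intro q
      have hf : List.filter pvValid (p :: ps) = p :: List.filter pvValid ps := by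
        simp [pvValid, h]
      rw [hf]
      by_cases hq : q = p
      · subst hq; simp [pvBump]; ring
      · simp [pvBump, hq, Ne.symm hq]
    · simp only [List.foldl_cons, if_neg h, ih]
      apply pvMk_congr
      intro q
      have hf : List.filter pvValid (p :: ps) = List.filter pvValid ps := by
        simp [pvValid, h]
      rw [hf]

-- the range-to-pairs list identity behind pvInnerA
lemma pvRangePairs (l : List Char) :
    (PySem.List.pyRange 0 ((l.length : Int) - 1) 1).map (fun i =>
      (PySem.List.pyGetD l i ' ', PySem.List.pyGetD l (i + 1) ' '))
    = l.zip (l.drop 1) := by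
  apply List.ext_getElem
  · simp [PySem.List.length_pyRange_one]
  · intro k h1 h2
    have hk : k < l.length - 1 := by
      simp [PySem.List.length_pyRange_one] at h1
      omega
    simp only [List.getElem_map, PySem.List.getElem_pyRange_one, List.getElem_zip,
      List.getElem_drop]
    have e1 : (k : Int) + 1 = (((k + 1 : Nat)) : Int) := by push_cast; ring
    have e0 : (0 : Int) + (k : Int) = ((k : Nat) : Int) := by ring
    rw [e0, e1, PySem.List.pyGetD_natCast, PySem.List.pyGetD_natCast,
      List.getD_eq_getElem _ _ (by omega), List.getD_eq_getElem _ _ (by omega)]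
    simp [Nat.add_comm]

-- A's inner index loop is the fold over the adjacent-pairs list
lemma pvInnerA (seq : String) (m : PySem.Dict String (PySem.Dict String Int)) :
    (PySem.List.pyRange 0 (PySem.Str.len seq - 1) 1).foldl (fun matrix i =>
      if String.singleton (PySem.List.pyGetD seq.toList i ' ') ∈ NUCLEOTIDES ∧
         String.singleton (PySem.List.pyGetD seq.toList (i + 1) ' ') ∈ NUCLEOTIDES then
        matrix.modify (String.singleton (PySem.List.pyGetD seq.toList i ' '))
          PySem.Dict.empty (fun row =>
            row.modify (String.singleton (PySem.List.pyGetD seq.toList (i + 1) ' ')) 0 (· + 1))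
      else matrix) m
    = (pvPairs seq).foldl (fun m p =>
        if p.1 ∈ NUCLEOTIDES ∧ p.2 ∈ NUCLEOTIDES then
          m.modify p.1 PySem.Dict.empty (fun row => row.modify p.2 0 (· + 1))
        else m) m := by
  rw [pvPairs, List.foldl_map, ← pvRangePairs seq.toList, List.foldl_map]
  simp [PySem.Str.len_eq]

-- A's whole loop nest, from a canonical state
lemma pvOuterA (ss : List String) (f : String × String → Int) :
    ss.foldl (fun matrix seq =>
      (PySem.List.pyRange 0 (PySem.Str.len seq - 1) 1).foldl (fun matrix i =>
        if String.singleton (PySem.List.pyGetD seq.toList i ' ') ∈ NUCLEOTIDES ∧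
           String.singleton (PySem.List.pyGetD seq.toList (i + 1) ' ') ∈ NUCLEOTIDES then
          matrix.modify (String.singleton (PySem.List.pyGetD seq.toList i ' '))
            PySem.Dict.empty (fun row =>
              row.modify (String.singleton (PySem.List.pyGetD seq.toList (i + 1) ' ')) 0 (· + 1))
        else matrix) matrix) (pvMk f)
    = pvMk (fun q => f q + ((((ss.flatMap pvPairs).filter pvValid)).count q : Int)) := by
  induction ss generalizing f with
  | nil => simp
  | cons s ss ih =>
    rw [List.foldl_cons, pvInnerA, pvFoldA, ih]
    apply pvMk_congr
    intro q
    simp [List.count_append]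
    ring

-- B's indicator fold over a pair list = the count of that pair (as strings)
lemma pvSumCount (x y : String) (l : List (Char × Char)) (acc : Int) :
    l.foldl (fun acc cc =>
        acc + (if String.singleton cc.1 = x ∧ String.singleton cc.2 = y then 1 else 0)) acc
    = acc + ((l.map (fun cc => (String.singleton cc.1, String.singleton cc.2))).count (x, y) : Int) := by
  induction l generalizing acc with
  | nil => simp
  | cons c l ih =>
    simp only [List.foldl_cons, ih, List.map_cons, List.count_cons]
    by_cases h : String.singleton c.1 = x ∧ String.singleton c.2 = y
    · have : ((x, y) : String × String) = (String.singleton c.1, String.singleton c.2) := by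
        simp [h.1, h.2]
      simp [h, this]
      ring
    · have hne : ¬ (((x, y) : String × String) = (String.singleton c.1, String.singleton c.2)) := by
        intro he
        exact h ⟨(Prod.ext_iff.mp he).1.symm, (Prod.ext_iff.mp he).2.symm⟩
      simp [h]

-- the concatenation B scans is the flatMap of pvPairs, after mapping chars to strings
lemma pvFlatMapPairs (ss : List String) :
    (ss.flatMap (fun seq => seq.toList.zip (PySem.List.slice seq.toList (some 1) none))).map
      (fun cc => (String.singleton cc.1, String.singleton cc.2))
    = ss.flatMap pvPairs := by
  rw [List.map_flatMap]
  apply List.flatMap_congr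
  intro s _
  have h1 : PySem.List.slice s.toList (some 1) none = s.toList.drop 1 := by
    simpa using PySem.List.slice_from_natCast s.toList 1
  rw [h1, pvPairs]

-- ===== VERDICT (by name: the statement is the Claim_ definition above) =====
theorem count_dinucleotides_spec : Claim_equal_count_dinucleotides := by
  intro sequences _
  show count_dinucleotides sequences = count_dinucleotides_alt sequences
  simp only [count_dinucleotides, count_dinucleotides_alt, pvMk_init, pvOuterA, pvSumCount,
    pvFlatMapPairs]
  simp only [pvMk, List.map_map, Function.comp_def]
  apply List.map_congr_left
  intro x hx
  refine congrArg _ ?_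
  apply List.map_congr_left
  intro y hy
  refine congrArg _ ?_
  have hv : pvValid (x, y) = true := by simp [pvValid, hx, hy]
  rw [List.count_filter hv]
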